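-- pv_equiv track=rewrite | github.com/drakan02/garbage-classification | prepare_taco.py | get_new_class_id
-- ===== SOURCE A (Python) =====
-- def get_new_class_id(cat_name):
--     name = cat_name.lower()
--
--     # --- NHÓM 4: CIGARETTE (Đặc biệt: Nhỏ nhưng số lượng nhiều) ---
--     if 'cigarette' in name:
--         return 4
--
--     # --- NHÓM 3: METAL & GLASS (Vật liệu cứng không phải nhựa) ---
--     # Gộp chung để tăng số lượng cho nhóm này (vì Glass quá ít)
--     if any(x in name for x in ['metal', 'aluminium', 'foil', 'can', 'tin', 'aerosol', 'pop tab', 'glass', 'jar']):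
--         return 3
--
--     # --- NHÓM 2: PAPER (Giấy) ---
--     if any(x in name for x in ['paper', 'carton', 'box', 'cardboard', 'receipt', 'tissue', 'tube']):
--         return 2
--
--     # --- NHÓM 1: HARD PLASTIC (Nhựa Cứng - Có hình khối rõ ràng) ---
--     # Chai, Cốc, Hộp, Nắp, Ống hút, Thìa dĩa
--     if any(x in name for x in ['bottle', 'cup', 'lid', 'straw', 'utensil', 'cutlery', 'container', 'tub', 'bucket', 'detergent', 'polystyrene', 'styrofoam']):
--         return 1
--
--     # --- NHÓM 0: SOFT PLASTIC (Nhựa Mềm & Rác vụn) ---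
--     # Túi, Vỏ kẹo, Màng bọc.
--     # Mẹo: Gán cả "Unlabeled" và "Fragment" vào đây vì đa số rác vô danh là mảnh nilon/nhựa vỡ.
--     if any(x in name for x in ['bag', 'wrapper', 'packet', 'sachet', 'film', 'pouch', 'blister', 'unlabeled', 'litter', 'plastic', 'fragment', 'debris', 'rope', 'shoe', 'clothing']):
--         return 0
--
--     return -1
-- ===== SOURCE B (Python) =====
-- KEYWORD_ID = {
--     'cigarette': 4,
--     'metal': 3, 'aluminium': 3, 'foil': 3, 'can': 3, 'tin': 3, 'aerosol': 3,
--     'pop tab': 3, 'glass': 3, 'jar': 3,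
--     'paper': 2, 'carton': 2, 'box': 2, 'cardboard': 2, 'receipt': 2,
--     'tissue': 2, 'tube': 2,
--     'bottle': 1, 'cup': 1, 'lid': 1, 'straw': 1, 'utensil': 1, 'cutlery': 1,
--     'container': 1, 'tub': 1, 'bucket': 1, 'detergent': 1, 'polystyrene': 1,
--     'styrofoam': 1,
--     'bag': 0, 'wrapper': 0, 'packet': 0, 'sachet': 0, 'film': 0, 'pouch': 0,
--     'blister': 0, 'unlabeled': 0, 'litter': 0, 'plastic': 0, 'fragment': 0,
--     'debris': 0, 'rope': 0, 'shoe': 0, 'clothing': 0,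
-- }
--
--
-- def get_new_class_id(cat_name):
--     # The highest-priority group in the original cascade is exactly the one
--     # with the highest numeric id, so "first matching group" = "max matching id".
--     name = cat_name.lower()
--     best = -1
--     for kw, cid in KEYWORD_ID.items():
--         if kw in name and cid > best:
--             best = cid
--     return best
-- ===== Notes on version B (the rewrite author's own statement) =====
-- stated objective: alternative
-- what changed: Instead of an ordered first-match cascade over keyword groups, B flattens all keywords into one keyword-to-id map and takes the maximum id over all matching keywords in a single accumulator pass (no early return); this is correct because the cascade's priority order coincides with the numeric id order.
import Mathlib
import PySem

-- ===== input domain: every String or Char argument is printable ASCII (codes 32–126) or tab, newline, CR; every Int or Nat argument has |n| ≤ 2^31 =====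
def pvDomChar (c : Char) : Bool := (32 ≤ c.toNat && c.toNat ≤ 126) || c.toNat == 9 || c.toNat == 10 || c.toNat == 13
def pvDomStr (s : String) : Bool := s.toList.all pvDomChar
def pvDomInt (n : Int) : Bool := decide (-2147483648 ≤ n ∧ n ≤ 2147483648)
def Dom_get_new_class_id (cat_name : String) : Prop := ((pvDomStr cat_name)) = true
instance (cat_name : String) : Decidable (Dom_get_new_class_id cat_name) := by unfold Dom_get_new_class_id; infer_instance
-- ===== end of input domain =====

-- B replaces A's first-match group cascade by a single max-accumulator pass over a flat
-- keyword→id map (correct because group priority order equals numeric id order).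

-- ===== PORT A =====
def get_new_class_id (cat_name : String) : Int :=
  let name := PySem.Str.lower cat_name
  if PySem.Str.isIn "cigarette" name then 4
  else if ["metal", "aluminium", "foil", "can", "tin", "aerosol", "pop tab", "glass", "jar"].any (fun x => PySem.Str.isIn x name) then 3
  else if ["paper", "carton", "box", "cardboard", "receipt", "tissue", "tube"].any (fun x => PySem.Str.isIn x name) then 2
  else if ["bottle", "cup", "lid", "straw", "utensil", "cutlery", "container", "tub", "bucket", "detergent", "polystyrene", "styrofoam"].any (fun x => PySem.Str.isIn x name) then 1
  else if ["bag", "wrapper", "packet", "sachet", "film", "pouch", "blister", "unlabeled", "litter", "plastic", "fragment", "debris", "rope", "shoe", "clothing"].any (fun x => PySem.Str.isIn x name) then 0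
  else -1

-- ===== PORT B =====
-- the KEYWORD_ID dict of Source B, as an association list in insertion order
def pvKEYWORD_ID : List (String × Int) :=
  [ ("cigarette", 4),
    ("metal", 3), ("aluminium", 3), ("foil", 3), ("can", 3), ("tin", 3), ("aerosol", 3),
    ("pop tab", 3), ("glass", 3), ("jar", 3),
    ("paper", 2), ("carton", 2), ("box", 2), ("cardboard", 2), ("receipt", 2),
    ("tissue", 2), ("tube", 2),
    ("bottle", 1), ("cup", 1), ("lid", 1), ("straw", 1), ("utensil", 1), ("cutlery", 1),
    ("container", 1), ("tub", 1), ("bucket", 1), ("detergent", 1), ("polystyrene", 1),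
    ("styrofoam", 1),
    ("bag", 0), ("wrapper", 0), ("packet", 0), ("sachet", 0), ("film", 0), ("pouch", 0),
    ("blister", 0), ("unlabeled", 0), ("litter", 0), ("plastic", 0), ("fragment", 0),
    ("debris", 0), ("rope", 0), ("shoe", 0), ("clothing", 0) ]

-- the loop body: `if kw in name and cid > best: best = cid`
def pvStep (name : String) (best : Int) (p : String × Int) : Int :=
  if PySem.Str.isIn p.1 name ∧ best < p.2 then p.2 else best

def get_new_class_id_alt (cat_name : String) : Int :=
  let name := PySem.Str.lower cat_name
  pvKEYWORD_ID.foldl (pvStep name) (-1)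

-- ===== PRECONDITION & SPEC =====
def Spec_get_new_class_id (cat_name : String) (out : Int) : Prop := out = get_new_class_id_alt cat_name
instance (cat_name : String) (out : Int) : Decidable (Spec_get_new_class_id cat_name out) := by unfold Spec_get_new_class_id; infer_instance

-- ===== CLAIM =====
def Claim_equal_get_new_class_id : Prop := ∀ (cat_name : String), Dom_get_new_class_id cat_name → Spec_get_new_class_id cat_name (get_new_class_id cat_name)

-- ===== LEMMAS AND PROOFS =====

-- folding the max-accumulator step over a constant-id keyword group
theorem pvFoldGroup (name : String) (c : Int) (kws : List String) (acc : Int) :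
    ((kws.map (fun k => (k, c))).foldl (pvStep name) acc)
      = if kws.any (fun k => PySem.Str.isIn k name) then (if acc < c then c else acc) else acc := by
  induction kws generalizing acc with
  | nil => simp
  | cons k rest ih =>
    simp only [List.map_cons, List.foldl_cons, List.any_cons, pvStep, ih,
      Bool.or_eq_true]
    split_ifs <;> first | rfl | tauto

theorem pvGrouped :
    pvKEYWORD_ID =
      (["cigarette"].map (fun k => (k, (4 : Int))))
      ++ (["metal", "aluminium", "foil", "can", "tin", "aerosol", "pop tab", "glass", "jar"].map (fun k => (k, (3 : Int))))
      ++ (["paper", "carton", "box", "cardboard", "receipt", "tissue", "tube"].map (fun k => (k, (2 : Int))))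
      ++ (["bottle", "cup", "lid", "straw", "utensil", "cutlery", "container", "tub", "bucket", "detergent", "polystyrene", "styrofoam"].map (fun k => (k, (1 : Int))))
      ++ (["bag", "wrapper", "packet", "sachet", "film", "pouch", "blister", "unlabeled", "litter", "plastic", "fragment", "debris", "rope", "shoe", "clothing"].map (fun k => (k, (0 : Int)))) := by
  rfl

-- ===== VERDICT =====
theorem get_new_class_id_spec : Claim_equal_get_new_class_id := by
  intro cat_name _
  unfold Spec_get_new_class_id get_new_class_id get_new_class_id_alt
  rw [pvGrouped]
  rw [List.foldl_append, List.foldl_append, List.foldl_append, List.foldl_append]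
  rw [pvFoldGroup, pvFoldGroup, pvFoldGroup, pvFoldGroup, pvFoldGroup]
  simp only [List.any_cons, List.any_nil, Bool.or_false]
  generalize PySem.Str.isIn "cigarette" (PySem.Str.lower cat_name) = b4
  generalize (PySem.Str.isIn "metal" (PySem.Str.lower cat_name) ||
      (PySem.Str.isIn "aluminium" (PySem.Str.lower cat_name) ||
        (PySem.Str.isIn "foil" (PySem.Str.lower cat_name) ||
          (PySem.Str.isIn "can" (PySem.Str.lower cat_name) ||
            (PySem.Str.isIn "tin" (PySem.Str.lower cat_name) ||
              (PySem.Str.isIn "aerosol" (PySem.Str.lower cat_name) ||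
                (PySem.Str.isIn "pop tab" (PySem.Str.lower cat_name) ||
                  (PySem.Str.isIn "glass" (PySem.Str.lower cat_name) ||
                    PySem.Str.isIn "jar" (PySem.Str.lower cat_name))))))))) = b3
  generalize (PySem.Str.isIn "paper" (PySem.Str.lower cat_name) ||
      (PySem.Str.isIn "carton" (PySem.Str.lower cat_name) ||
        (PySem.Str.isIn "box" (PySem.Str.lower cat_name) ||
          (PySem.Str.isIn "cardboard" (PySem.Str.lower cat_name) ||
            (PySem.Str.isIn "receipt" (PySem.Str.lower cat_name) ||
              (PySem.Str.isIn "tissue" (PySem.Str.lower cat_name) ||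
                PySem.Str.isIn "tube" (PySem.Str.lower cat_name))))))) = b2
  generalize (PySem.Str.isIn "bottle" (PySem.Str.lower cat_name) ||
      (PySem.Str.isIn "cup" (PySem.Str.lower cat_name) ||
        (PySem.Str.isIn "lid" (PySem.Str.lower cat_name) ||
          (PySem.Str.isIn "straw" (PySem.Str.lower cat_name) ||
            (PySem.Str.isIn "utensil" (PySem.Str.lower cat_name) ||
              (PySem.Str.isIn "cutlery" (PySem.Str.lower cat_name) ||
                (PySem.Str.isIn "container" (PySem.Str.lower cat_name) ||
                  (PySem.Str.isIn "tub" (PySem.Str.lower cat_name) ||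
                    (PySem.Str.isIn "bucket" (PySem.Str.lower cat_name) ||
                      (PySem.Str.isIn "detergent" (PySem.Str.lower cat_name) ||
                        (PySem.Str.isIn "polystyrene" (PySem.Str.lower cat_name) ||
                          PySem.Str.isIn "styrofoam" (PySem.Str.lower cat_name)))))))))))) = b1
  generalize (PySem.Str.isIn "bag" (PySem.Str.lower cat_name) ||
      (PySem.Str.isIn "wrapper" (PySem.Str.lower cat_name) ||
        (PySem.Str.isIn "packet" (PySem.Str.lower cat_name) ||
          (PySem.Str.isIn "sachet" (PySem.Str.lower cat_name) ||
            (PySem.Str.isIn "film" (PySem.Str.lower cat_name) ||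
              (PySem.Str.isIn "pouch" (PySem.Str.lower cat_name) ||
                (PySem.Str.isIn "blister" (PySem.Str.lower cat_name) ||
                  (PySem.Str.isIn "unlabeled" (PySem.Str.lower cat_name) ||
                    (PySem.Str.isIn "litter" (PySem.Str.lower cat_name) ||
                      (PySem.Str.isIn "plastic" (PySem.Str.lower cat_name) ||
                        (PySem.Str.isIn "fragment" (PySem.Str.lower cat_name) ||
                          (PySem.Str.isIn "debris" (PySem.Str.lower cat_name) ||
                            (PySem.Str.isIn "rope" (PySem.Str.lower cat_name) ||
                              (PySem.Str.isIn "shoe" (PySem.Str.lower cat_name) ||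
                                PySem.Str.isIn "clothing" (PySem.Str.lower cat_name))))))))))))))) = b0
  revert b4 b3 b2 b1 b0
  decide
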